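/- GENERATED by farm/worked/mk_tree_copies.py from farm/worked/pow_int/Proof.lean (a worked proof of the farm's unit `pow_int`,
   accepted by the verdict) — do not edit. -/
import Vorbis.Spec.Units.pow_int

open X86 X86.User Asan Vorbis

set_option maxRecDepth 4000
set_option maxHeartbeats 4000000

namespace Vorbis.Spec.Worked.pow_int
open Vorbis.Spec.pow_int (Statement)

/-- The measure of the loop of `pow_int`: halving a 32-bit value that is not 0 makes it smaller. -/
theorem shr1_lt_w (n : Word) (h : ¬ (Word.part Width.w32 n).toNat = 0) :
    (Word.ofBV (Word.part Width.w32 n >>> 1)).toNat % 2 ^ 32 < n.toNat % 2 ^ 32 := by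
  unfold Word.part Word.ofBV at *
  simp only [Width.bits, BitVec.toNat_setWidth, UInt64.toNat_toBitVec, BitVec.toNat_ushiftRight,
    UInt64.toNat_ofBitVec] at *
  omega

end Vorbis.Spec.Worked.pow_int

/-- `pow_int` satisfies its contract: the only loop of libm, counted by `edi`. -/
theorem Vorbis.Spec.Worked.pow_int_ok : Vorbis.Spec.pow_int.Statement := by
  intro Lay hLay μ hμ u₀ hcode others frames u ret he hpre
  v_entry he
  u_walk hcode [hμ.vendor] until [Vorbis.L.pow_int.loop1] span [Vorbis.L.textLo, Vorbis.L.textHi] side (v_side)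
  -- the loop head: `edi` is anything, the flags and the sticky bits of MXCSR vary
  have hdf : s_101da8.flags .df = false := by
    rw [w_flags]
    exact he_df
  have hmx : s_101da8.mxcsr &&& 0x1F80 = 0x1F80 := by
    rw [w_mxcsr]
    exact he_mx
  obtain ⟨n, w_rdi⟩ : ∃ n : Word, s_101da8.reg .rdi = n := ⟨_, rfl⟩
  replace w_kept := w_kept.mono_all (S' := [.rdi]) (by rfl)
  clear w_flags w_mxcsr
  u_loop [n] (fun v => (v.reg .rdi).toNat % 2 ^ 32)
  u_walk hcode [hμ.vendor] until [Vorbis.L.pow_int.loop1] span [Vorbis.L.textLo, Vorbis.L.textHi] side (v_side)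
  · -- n = 0: the exit, walked to the `ret`
    refine ReachVia.done (Or.inl ?_)
    v_returned
    show ShadowUntouched u.mem s_101dc4.mem
    v_untouched
  · -- the back edge, bit 0 clear
    u_loop_back [Word.ofBV (Word.part Width.w32 n >>> 1)]
    · rw [w_flags]
      simp only [X86.User.df_setStatus]
      exact hdf
    · rw [w_mxcsr]
      exact hmx_101daa
    · rw [w_rdi]
      exact Vorbis.Spec.Worked.pow_int.shr1_lt_w n hbr_101db2
  · -- the back edge, bit 0 set
    u_loop_back [Word.ofBV (Word.part Width.w32 n >>> 1)]
    · rw [w_flags]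
      simp only [X86.User.df_setStatus]
      exact hdf
    · rw [w_mxcsr]
      assumption
    · rw [w_rdi]
      exact Vorbis.Spec.Worked.pow_int.shr1_lt_w n hbr_101db2
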